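-- pv_equiv track=rewrite | github.com/masonacevedo/leetcode_problems_new | 3546_Equal_Sum_Grid_Partition_I.py | generateColSums
-- ===== SOURCE A (Python) =====
-- def generateColSums(grid):
--     numRows = len(grid)
--     numCols = len(grid[0])
--     colSums = []
--     for col in range(0, numCols):
--         currentColTotal = 0
--         for row in range(0, numRows):
--             num = grid[row][col]
--             currentColTotal += num
--         colSums.append(currentColTotal)
--     return colSums
-- ===== SOURCE B (Python) =====
-- def generateColSums(grid):
--     numCols = len(grid[0])
--     colSums = [0] * numCols
--     for row in grid:
--         colSums = [colSums[j] + row[j] for j in range(numCols)]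
--     return colSums
-- ===== Notes on version B (the rewrite author's own statement) =====
-- stated objective: alternative
-- what changed: Replaced A's column-major nested index loops (for each column, scan all rows) with a single row-major streaming pass that maintains a running vector of partial column totals, updated elementwise for each row.
import Mathlib
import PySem

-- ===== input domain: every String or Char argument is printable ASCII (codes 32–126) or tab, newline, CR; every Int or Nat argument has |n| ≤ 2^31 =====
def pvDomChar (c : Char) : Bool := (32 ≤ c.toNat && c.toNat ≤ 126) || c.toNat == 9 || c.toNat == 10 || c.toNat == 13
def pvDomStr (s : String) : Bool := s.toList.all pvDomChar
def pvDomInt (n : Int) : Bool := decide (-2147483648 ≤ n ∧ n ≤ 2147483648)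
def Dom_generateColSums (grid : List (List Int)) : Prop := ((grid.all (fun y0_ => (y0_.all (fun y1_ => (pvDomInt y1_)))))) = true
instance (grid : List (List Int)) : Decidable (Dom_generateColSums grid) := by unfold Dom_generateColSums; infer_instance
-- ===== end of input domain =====

-- B replaces A's column-major nested index loops with a row-major streaming pass that keeps a running vector of partial column totals (alternative decomposition, same cost).

-- ===== PORT A =====
-- literal transliteration of A: for each column index, an inner loop over row indices accumulates grid[row][col]
-- (index accesses ported with pyGetD; inside Pre_ every access is in range, matching Python exactly)
def generateColSums (grid : List (List Int)) : List Int :=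
  let numRows : Int := grid.length
  let numCols : Int := (PySem.List.pyGetD grid 0 []).length
  (PySem.List.pyRange 0 numCols 1).foldl (fun colSums col =>
    let currentColTotal :=
      (PySem.List.pyRange 0 numRows 1).foldl (fun t row =>
        t + PySem.List.pyGetD (PySem.List.pyGetD grid row []) col 0) 0
    colSums ++ [currentColTotal]) []

-- ===== PORT B =====
-- literal transliteration of Source B: colSums starts as [0]*numCols and for each row is
-- rebuilt elementwise as [colSums[j] + row[j] for j in range(numCols)]
-- (inside Pre_ the indices colSums[j] and row[j] are always in range, so getD is exact)
def generateColSums_alt (grid : List (List Int)) : List Int :=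
  let numCols := (PySem.List.pyGetD grid 0 []).length
  grid.foldl (fun colSums row =>
    (List.range numCols).map (fun j => colSums.getD j 0 + row.getD j 0))
    (List.replicate numCols 0)

-- ===== PRECONDITION & SPEC =====
-- Pre_ excludes exactly the inputs on which A raises IndexError: the empty grid (grid[0])
-- and ragged grids where some row is shorter than the first row (grid[row][col]).
def Pre_generateColSums (grid : List (List Int)) : Prop :=
  grid ≠ [] ∧ ∀ r ∈ grid, (grid.headD []).length ≤ r.length
instance (grid : List (List Int)) : Decidable (Pre_generateColSums grid) := by unfold Pre_generateColSums; infer_instance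
def pvWitness_generateColSums : List (List Int) := [[1, 2], [3, 4]]

def Spec_generateColSums (grid : List (List Int)) (out : List Int) : Prop := out = generateColSums_alt grid
instance (grid : List (List Int)) (out : List Int) : Decidable (Spec_generateColSums grid out) := by unfold Spec_generateColSums; infer_instance

-- ===== CLAIM (what is proved, stated in full; the proofs are below) =====
def Claim_equal_generateColSums : Prop := ∀ (grid : List (List Int)), Dom_generateColSums grid → Pre_generateColSums grid → Spec_generateColSums grid (generateColSums grid)

-- ===== LEMMAS AND PROOFS =====

-- a row-sum loop with accumulator a equals a plus the mapped sum
theorem pv_foldl_add (c : Nat) (l : List (List Int)) (a : Int) :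
    l.foldl (fun t r => t + r.getD c 0) a = a + (l.map (fun r => r.getD c 0)).sum := by
  induction l generalizing a with
  | nil => simp
  | cons x xs ih => rw [List.foldl_cons, ih, add_assoc]; simp

-- (range n).map g indexed inside the range gives g back
theorem pv_getD_range_map (g : Nat → Int) (n j : Nat) (h : j < n) :
    ((List.range n).map g).getD j 0 = g j := by
  simp [List.getD, h]

-- B's outer fold: starting from a column vector (range n).map g, folding the rows adds
-- each row elementwise, giving g plus the per-column sums
theorem pv_B_fold (n : Nat) (l : List (List Int)) (g : Nat → Int) :
    l.foldl (fun colSums row =>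
        (List.range n).map (fun j => colSums.getD j 0 + row.getD j 0))
      ((List.range n).map g) =
    (List.range n).map (fun j => g j + (l.map (fun r => r.getD j 0)).sum) := by
  induction l generalizing g with
  | nil => simp
  | cons r rs ih =>
    simp only [List.foldl_cons]
    have hstep : (List.range n).map (fun j => ((List.range n).map g).getD j 0 + r.getD j 0)
        = (List.range n).map (fun j => g j + r.getD j 0) := by
      refine List.map_congr_left (fun j hj => ?_)
      rw [pv_getD_range_map g n j (List.mem_range.mp hj)]
    rw [hstep, ih (fun j => g j + r.getD j 0)]
    refine List.map_congr_left (fun j _ => ?_)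
    simp [add_assoc]

-- both ports compute (range n).map (column sum) where n is the first row's length
theorem pv_A_eq (grid : List (List Int)) :
    generateColSums grid =
      (List.range (PySem.List.pyGetD grid 0 []).length).map
        (fun c => grid.foldl (fun t r => t + r.getD c 0) 0) := by
  simp only [generateColSums]
  simp only [PySem.List.foldl_append_singleton_eq_map, List.nil_append]
  rw [PySem.List.pyRange_zero_natCast (PySem.List.pyGetD grid 0 []).length]
  simp only [List.map_map]
  refine List.map_congr_left (fun c hc => ?_)
  simp only [Function.comp_apply]
  rw [PySem.List.foldl_pyRange_zero_pyGetD' grid []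
    (fun t r => t + PySem.List.pyGetD r (c : Int) 0) 0]
  simp [PySem.List.pyGetD_natCast]

theorem generateColSums_eq_of_pre (grid : List (List Int)) :
    generateColSums grid = generateColSums_alt grid := by
  simp only [generateColSums_alt]
  rw [pv_A_eq]
  have hrep : (List.replicate (PySem.List.pyGetD grid 0 []).length (0 : Int))
      = (List.range (PySem.List.pyGetD grid 0 []).length).map (fun _ => (0 : Int)) := by
    simp [List.map_const']
  rw [hrep, pv_B_fold]
  refine List.map_congr_left (fun c _ => ?_)
  rw [pv_foldl_add]

-- ===== VERDICT (by name: the statement is the Claim_ definition above) =====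
theorem generateColSums_spec : Claim_equal_generateColSums := by
  intro grid _ _
  exact generateColSums_eq_of_pre grid
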